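-- pv_equiv track=rewrite | github.com/suzanv/PairwisePreferenceLearning | pairwise.py | greedy_sort
-- ===== SOURCE A (Python) =====
-- def get_sum_prefs (PREF,V,v):
--     sum_prefs = 0
--     for u in V:
--         if (v,u) in PREF:
--             sum_prefs += PREF[(v,u)]
--             #print ("\t",(v,u),sum_prefs)
--         if (u,v) in PREF:
--             sum_prefs -= PREF[(u,v)]
--     return sum_prefs
--
-- def greedy_sort(X,PREF):
--     V = X
--     maxv = ""
--     max_sum_prefs = 0
--     for v in V:
--         sum_prefs = get_sum_prefs(PREF,V,v)
--         #print (v, "sum prefs:",sum_prefs)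
--         if sum_prefs > max_sum_prefs:
--             maxv = v
--             max_sum_prefs = sum_prefs
--     sorted_X = list()
--     #print ("First maxv:", maxv,"sum prefs:",max_sum_prefs,"nodes left:",len(V))
--
--     while len(V)> 1 and not maxv is "":
--         sorted_X.append(maxv)
--         V.remove(maxv)
--         maxv = ""
--         max_sum_prefs = 0
--         for v in V:
--             sum_prefs = get_sum_prefs(PREF,V,v)
--             #print (v, "sum prefs:",sum_prefs)
--
--             if sum_prefs > max_sum_prefs:
--                 maxv = v
--                 max_sum_prefs = sum_prefs
--         #print ("maxv:", maxv,"sum prefs:",max_sum_prefs,"nodes left:",len(V))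
--
--     # add remaining v's with sumprefs=0
--     for v in V:
--         sorted_X.append(v)
--     return sorted_X
-- ===== SOURCE B (Python) =====
-- # Greedy ordering by pairwise preference sums, O(n^2): initial sums in one pass over PREF
-- # (weighted by vertex multiplicities), then incremental updates after each removal.
-- # Selection rule as in the original: the vertex with the strictly maximal positive sum,
-- # "" doubling as the 'no candidate' marker (so a vertex named "" is never selected).
-- # Unlike A, B does not mutate the caller's list X.
-- def greedy_sort(X, PREF):
--     V = list(X)
--     cnt = {}
--     for v in V:
--         cnt[v] = cnt.get(v, 0) + 1
--     base = {}
--     for (a, b), w in PREF.items():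
--         base[a] = base.get(a, 0) + w * cnt.get(b, 0)
--         base[b] = base.get(b, 0) - w * cnt.get(a, 0)
--     s = [base.get(v, 0) for v in V]
--     out = []
--     while len(V) > 1:
--         best = ""
--         best_sum = 0
--         best_i = -1
--         for i, (v, x) in enumerate(zip(V, s)):
--             if x > best_sum:
--                 best, best_sum, best_i = v, x, i
--         if best == "":
--             break
--         out.append(best)
--         V.pop(best_i)
--         s.pop(best_i)
--         for i in range(len(V)):
--             s[i] -= PREF.get((V[i], best), 0) - PREF.get((best, V[i]), 0)
--     out.extend(V)
--     return out
-- ===== Notes on version B (the rewrite author's own statement) =====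
-- stated objective: faster
-- what changed: B builds all initial preference sums in a single pass over PREF (weighting by a vertex-multiplicity counter) and, after each removal, updates the remaining sums incrementally, instead of A's full recomputation of every pairwise sum at every step; the selection rule (strictly maximal positive sum, '' meaning no candidate) is kept, and B does not mutate the caller's list.
import Mathlib
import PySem

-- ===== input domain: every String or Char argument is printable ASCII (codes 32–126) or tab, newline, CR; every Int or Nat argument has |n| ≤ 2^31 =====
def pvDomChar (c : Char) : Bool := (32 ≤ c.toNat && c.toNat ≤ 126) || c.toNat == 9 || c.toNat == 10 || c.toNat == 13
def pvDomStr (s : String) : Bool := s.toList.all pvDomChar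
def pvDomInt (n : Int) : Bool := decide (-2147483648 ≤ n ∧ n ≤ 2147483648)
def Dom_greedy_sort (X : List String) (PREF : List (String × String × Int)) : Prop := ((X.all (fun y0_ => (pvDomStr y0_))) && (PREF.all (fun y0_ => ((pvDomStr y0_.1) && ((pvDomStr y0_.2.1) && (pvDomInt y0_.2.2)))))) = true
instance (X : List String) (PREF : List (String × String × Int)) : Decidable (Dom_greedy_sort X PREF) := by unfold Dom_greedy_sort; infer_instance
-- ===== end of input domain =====

-- B replaces A's full recomputation of all pairwise preference sums at every removal step by
-- one initial computation plus incremental updates (same selection rule, fewer lookups).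
-- Note: Python A mutates its argument X in place (V = X; V.remove); B does not — the
-- equivalence proved here is about the RETURN value only.

-- ===== PORT A =====
-- dict[(v,u)] as association list: membership = isSome, lookup = value of the first matching entry
def pvLook (PREF : List (String × String × Int)) (v u : String) : Option Int :=
  (PREF.find? (fun e => e.1 == v && e.2.1 == u)).map (fun e => e.2.2)

def get_sum_prefs (PREF : List (String × String × Int)) (V : List String) (v : String) : Int :=
  V.foldl (fun sum_prefs u =>
    let s1 := if (pvLook PREF v u).isSome then sum_prefs + (pvLook PREF v u).getD 0 else sum_prefs
    if (pvLook PREF u v).isSome then s1 - (pvLook PREF u v).getD 0 else s1) 0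

-- the scan 'maxv = ""; max_sum_prefs = 0; for v in V: …' (used before the loop and after each removal)
def pvScanMax (PREF : List (String × String × Int)) (V : List String) : String × Int :=
  V.foldl (fun m v =>
    let sum_prefs := get_sum_prefs PREF V v
    if sum_prefs > m.2 then (v, sum_prefs) else m) ("", 0)

-- the while loop; 'not maxv is ""' = maxv ≠ "" ("" is interned in CPython);
-- V.remove(maxv) removes the first occurrence (maxv is always present, so List.erase is exact);
-- fuel = initial length: each iteration removes one element and the loop stops at length ≤ 1,
-- so the fuel never runs out on a reachable state.
def pvLoopA (PREF : List (String × String × Int)) : Nat → List String → String → List String → List String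
  | 0, V, _, sorted_X => sorted_X ++ V
  | fuel+1, V, maxv, sorted_X =>
    if 1 < V.length ∧ maxv ≠ "" then
      pvLoopA PREF fuel (V.erase maxv) (pvScanMax PREF (V.erase maxv)).1 (sorted_X ++ [maxv])
    else sorted_X ++ V

def greedy_sort (X : List String) (PREF : List (String × String × Int)) : List String :=
  pvLoopA PREF X.length X (pvScanMax PREF X).1 []

-- ===== PORT B =====
-- PREF.get((v,u), 0)
def pvGet (PREF : List (String × String × Int)) (v u : String) : Int := (pvLook PREF v u).getD 0

-- 'cnt = {}; for v in V: cnt[v] = cnt.get(v, 0) + 1'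
def pvCounter (V : List String) : PySem.Dict String Int :=
  V.foldl (fun cnt v => cnt.modify v 0 (fun x => x + 1)) PySem.Dict.empty

-- 'base = {}; for (a, b), w in PREF.items(): base[a] = base.get(a,0) + w*cnt.get(b,0); …'
def pvBase (PREF : List (String × String × Int)) (cnt : PySem.Dict String Int) : PySem.Dict String Int :=
  PREF.foldl (fun base e =>
    (base.modify e.1 0 (fun x => x + e.2.2 * cnt.getD e.2.1 0)).modify e.2.1 0
      (fun x => x - e.2.2 * cnt.getD e.1 0)) PySem.Dict.empty

-- 'best=""; best_sum=0; best_i=-1; for i,(v,x) in enumerate(zip(V,s)): if x > best_sum: …'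
def pvScanB (l : List (String × Int)) : String × Int × Int :=
  (PySem.List.enumerate l 0).foldl
    (fun p iv => if iv.2.2 > p.2.1 then (iv.2.1, iv.2.2, iv.1) else p) ("", 0, -1)

-- the while loop of B: pop at best_i (a valid index when reached, so toNat/eraseIdx are exact),
-- then the in-place update of the remaining sums
def pvLoopB (PREF : List (String × String × Int)) : Nat → List String → List Int → List String → List String
  | 0, V, _, out => out ++ V
  | fuel+1, V, s, out =>
    if 1 < V.length then
      let p := pvScanB (V.zip s)
      if p.1 = "" then out ++ V
      else
        let i := p.2.2.toNat
        let V' := V.eraseIdx i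
        let s' := List.zipWith (fun v x => x - (pvGet PREF v p.1 - pvGet PREF p.1 v)) V' (s.eraseIdx i)
        pvLoopB PREF fuel V' s' (out ++ [p.1])
    else out ++ V

def greedy_sort_alt (X : List String) (PREF : List (String × String × Int)) : List String :=
  pvLoopB PREF X.length X (X.map (fun v => (pvBase PREF (pvCounter X)).getD v 0)) []

-- ===== PRECONDITION & SPEC =====
-- Pre_ requires pairwise-distinct keys in the PREF association list: a list with a repeated
-- key does not represent any Python dict (dict keys are unique), so no behaviour of the
-- Python programs is claimed for it.
def Pre_greedy_sort (X : List String) (PREF : List (String × String × Int)) : Prop :=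
  (PREF.map (fun e => (e.1, e.2.1))).Nodup
instance (X : List String) (PREF : List (String × String × Int)) : Decidable (Pre_greedy_sort X PREF) := by
  unfold Pre_greedy_sort; infer_instance

def pvWitness_greedy_sort : List String × (List (String × String × Int)) :=
  (["a", "b"], [("a", "b", 1)])

def Spec_greedy_sort (X : List String) (PREF : List (String × String × Int)) (out : List String) : Prop := out = greedy_sort_alt X PREF
instance (X : List String) (PREF : List (String × String × Int)) (out : List String) : Decidable (Spec_greedy_sort X PREF out) := by unfold Spec_greedy_sort; infer_instance

-- ===== CLAIM (what is proved, stated in full; the proofs are below) =====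
def Claim_equal_greedy_sort : Prop := ∀ (X : List String) (PREF : List (String × String × Int)), Dom_greedy_sort X PREF → Pre_greedy_sort X PREF → Spec_greedy_sort X PREF (greedy_sort X PREF)

-- ===== LEMMAS AND PROOFS =====

-- the signed preference contribution of u to v's sum
def pvF (PREF : List (String × String × Int)) (v u : String) : Int :=
  pvGet PREF v u - pvGet PREF u v

theorem pvGsp_eq_sum (P : List (String × String × Int)) (V : List String) (v : String) :
    get_sum_prefs P V v = (V.map (pvF P v)).sum := by
  unfold get_sum_prefs
  have h : (fun (sum_prefs : Int) (u : String) =>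
      let s1 := if (pvLook P v u).isSome then sum_prefs + (pvLook P v u).getD 0 else sum_prefs
      if (pvLook P u v).isSome then s1 - (pvLook P u v).getD 0 else s1)
      = fun (acc : Int) (u : String) => acc + pvF P v u := by
    funext a u
    cases h1 : pvLook P v u <;> cases h2 : pvLook P u v <;>
      simp [pvF, pvGet, h1, h2] <;> ring
  rw [h, PySem.List.foldl_add]
  simp

theorem pvSum_eraseIdx : ∀ (l : List Int) (i : Nat) (h : i < l.length),
    (l.eraseIdx i).sum = l.sum - l[i] := by
  intro l
  induction l with
  | nil => intro i h; simp at h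
  | cons x xs ih =>
    intro i h
    cases i with
    | zero => simp
    | succ j =>
      simp only [List.eraseIdx_cons_succ, List.sum_cons, List.getElem_cons_succ]
      rw [ih j (by simpa using h)]
      ring

theorem pvMap_eraseIdx {α β : Type} (g : α → β) : ∀ (l : List α) (i : Nat),
    (l.eraseIdx i).map g = (l.map g).eraseIdx i := by
  intro l
  induction l with
  | nil => intro i; simp
  | cons x xs ih =>
    intro i
    cases i with
    | zero => simp
    | succ j => simp [ih j]

theorem pvGsp_eraseIdx (P : List (String × String × Int)) (V : List String) (v : String)
    (i : Nat) (h : i < V.length) :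
    get_sum_prefs P (V.eraseIdx i) v = get_sum_prefs P V v - pvF P v V[i] := by
  rw [pvGsp_eq_sum, pvGsp_eq_sum, pvMap_eraseIdx,
    pvSum_eraseIdx (V.map (pvF P v)) i (by simpa using h)]
  simp

theorem pvZipWith_map (c : String → Int) : ∀ (V : List String) (g : String → Int),
    List.zipWith (fun v x => x - c v) V (V.map g) = V.map (fun v => g v - c v) := by
  intro V
  induction V with
  | nil => intro g; simp
  | cons x xs ih => intro g; simp [ih g]

theorem pvZipSelf (g : String → Int) : ∀ (V : List String),
    V.zip (V.map g) = V.map (fun v => (v, g v)) := by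
  intro V
  induction V with
  | nil => simp
  | cons x xs ih => simp [ih]

theorem pvErase_eq_eraseIdx : ∀ (V : List String) (i : Nat) (h : i < V.length),
    (∀ (j : Nat) (hj : j < i), V[j]'(Nat.lt_trans hj h) ≠ V[i]) →
    V.erase V[i] = V.eraseIdx i := by
  intro V
  induction V with
  | nil => intro i h; simp at h
  | cons x xs ih =>
    intro i h hfirst
    cases i with
    | zero => simp
    | succ j =>
      have hx : x ≠ (x :: xs)[j+1] := hfirst 0 (Nat.succ_pos j)
      simp only [List.getElem_cons_succ] at hx ⊢
      rw [List.erase_cons_tail (by simpa using hx)]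
      rw [List.eraseIdx_cons_succ, ih j (by simpa using h)
        (fun j' hj' => by simpa using hfirst (j'+1) (by omega))]

-- the joint characterisation of A's scan over names and B's scan over enumerated (name, sum)
-- pairs (same strict-> argmax rule, first attainment)
theorem pvJoint (g : String → Int) :
    ∀ (V : List String) (k : Int) (m : String × Int) (p : String × Int × Int), m.2 = p.2.1 →
    (V.foldl (fun m v => if g v > m.2 then (v, g v) else m) m = m ∧
      (PySem.List.enumerate (V.map (fun v => (v, g v))) k).foldl
        (fun p iv => if iv.2.2 > p.2.1 then (iv.2.1, iv.2.2, iv.1) else p) p = p)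
    ∨ (∃ (j : Nat) (hj : j < V.length),
        V.foldl (fun m v => if g v > m.2 then (v, g v) else m) m = (V[j], g V[j]) ∧
        (PySem.List.enumerate (V.map (fun v => (v, g v))) k).foldl
          (fun p iv => if iv.2.2 > p.2.1 then (iv.2.1, iv.2.2, iv.1) else p) p
          = (V[j], g V[j], k + j) ∧
        m.2 < g V[j] ∧
        ∀ (j' : Nat) (hj' : j' < j), g (V[j']'(Nat.lt_trans hj' hj)) < g V[j]) := by
  intro V
  induction V with
  | nil =>
    intro k m p hmp
    left
    simp [PySem.List.enumerate_nil]
  | cons v V ih =>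
    intro k m p hmp
    simp only [List.map_cons, PySem.List.enumerate_cons, List.foldl_cons]
    by_cases hc : g v > m.2
    · rw [if_pos hc, if_pos (by rw [← hmp]; exact hc)]
      rcases ih (k + 1) (v, g v) (v, g v, k) rfl with ⟨h1, h2⟩ | ⟨j, hj, h1, h2, hlt, hfirst⟩
      · right
        refine ⟨0, by simp, ?_, ?_, by simpa using hc, by intro j' hj'; omega⟩
        · simpa using h1
        · simpa using h2
      · right
        refine ⟨j + 1, by simpa using Nat.succ_lt_succ hj, ?_, ?_, ?_, ?_⟩
        · simpa using h1
        · rw [h2]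
          have : k + 1 + (j : Int) = k + ((j : Nat) + 1 : Nat) := by push_cast; ring
          rw [this]
          simp
        · simp only [List.getElem_cons_succ]
          exact lt_trans hc hlt
        · intro j' hj'
          cases j' with
          | zero => simpa using hlt
          | succ j'' => simpa using hfirst j'' (by omega)
    · rw [if_neg hc, if_neg (by rw [← hmp]; exact hc)]
      rcases ih (k + 1) m p hmp with ⟨h1, h2⟩ | ⟨j, hj, h1, h2, hlt, hfirst⟩
      · left; exact ⟨h1, h2⟩
      · right
        refine ⟨j + 1, by simpa using Nat.succ_lt_succ hj, ?_, ?_, ?_, ?_⟩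
        · simpa using h1
        · rw [h2]
          have : k + 1 + (j : Int) = k + ((j : Nat) + 1 : Nat) := by push_cast; ring
          rw [this]
          simp
        · simpa using hlt
        · intro j' hj'
          cases j' with
          | zero =>
            simp only [List.getElem_cons_succ, List.getElem_cons_zero]
            omega
          | succ j'' => simpa using hfirst j'' (by omega)

theorem pvGet_nil (v u : String) : pvGet [] v u = 0 := rfl

theorem pvGet_cons (e : String × String × Int) (P : List (String × String × Int)) (v u : String) :
    pvGet (e :: P) v u = if e.1 = v ∧ e.2.1 = u then e.2.2 else pvGet P v u := by
  by_cases h : e.1 = v ∧ e.2.1 = u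
  · simp [pvGet, pvLook, h.1, h.2]
  · have hb : (e.1 == v && e.2.1 == u) = false := by
      rcases not_and_or.1 h with h1 | h1 <;> simp [h1]
    simp [pvGet, pvLook, hb, h]

theorem pvGet_eq_zero_of_not_mem : ∀ (P : List (String × String × Int)) (v u : String),
    (v, u) ∉ P.map (fun e => (e.1, e.2.1)) → pvGet P v u = 0 := by
  intro P
  induction P with
  | nil => intro v u _; rfl
  | cons e P ih =>
    intro v u h
    simp only [List.map_cons, List.mem_cons] at h
    rw [not_or] at h
    rw [pvGet_cons, if_neg (by intro hc; exact h.1 (by rw [hc.1, hc.2]))]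
    exact ih v u h.2

theorem pvSum_map_add {α : Type} (f g : α → Int) : ∀ (l : List α),
    (l.map (fun x => f x + g x)).sum = (l.map f).sum + (l.map g).sum := by
  intro l
  induction l with
  | nil => simp
  | cons x xs ih => simp only [List.map_cons, List.sum_cons, ih]; ring

theorem pvSum_map_neg {α : Type} (f : α → Int) : ∀ (l : List α),
    (l.map (fun x => -(f x))).sum = -((l.map f).sum) := by
  intro l
  induction l with
  | nil => simp
  | cons x xs ih => simp only [List.map_cons, List.sum_cons, ih]; ring

theorem pvSum_map_sub {α : Type} (f g : α → Int) : ∀ (l : List α),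
    (l.map (fun x => f x - g x)).sum = (l.map f).sum - (l.map g).sum := by
  intro l
  induction l with
  | nil => simp
  | cons x xs ih => simp only [List.map_cons, List.sum_cons, ih]; ring

theorem pvSum_point (t : String) (g h : String → Int) (hgh : ∀ u, u ≠ t → g u = h u) :
    ∀ (V : List String),
    (V.map g).sum = (V.map h).sum + (V.count t : Int) * (g t - h t) := by
  intro V
  induction V with
  | nil => simp
  | cons x xs ih =>
    simp only [List.map_cons, List.sum_cons, List.count_cons, ih]
    by_cases hx : x = t
    · subst hx; simp; ring
    · rw [hgh x hx]
      simp [hx]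
      ring

theorem pvSumGet_left (V : List String) :
    ∀ (P : List (String × String × Int)), (P.map (fun e => (e.1, e.2.1))).Nodup →
    ∀ v, (V.map (fun u => pvGet P v u)).sum
      = (P.map (fun e => if e.1 = v then e.2.2 * (V.count e.2.1 : Int) else 0)).sum := by
  intro P
  induction P with
  | nil => intro _ v; simp [pvGet_nil]
  | cons e P ih =>
    intro hnd v
    simp only [List.map_cons, List.nodup_cons] at hnd
    simp only [List.map_cons, List.sum_cons]
    by_cases hv : e.1 = v
    · have hzero : pvGet P v e.2.1 = 0 :=
        pvGet_eq_zero_of_not_mem P v e.2.1 (by rw [← hv]; exact hnd.1)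
      have hself : pvGet (e :: P) v e.2.1 = e.2.2 := by
        rw [pvGet_cons, if_pos ⟨hv, rfl⟩]
      have hoff : ∀ u, u ≠ e.2.1 → pvGet (e :: P) v u = pvGet P v u := by
        intro u hu
        rw [pvGet_cons, if_neg (fun hc => hu hc.2.symm)]
      rw [pvSum_point e.2.1 (fun u => pvGet (e :: P) v u) (fun u => pvGet P v u) hoff V,
        ih hnd.2 v, hself, hzero, if_pos hv]
      ring
    · have hall : ∀ u ∈ V, pvGet (e :: P) v u = pvGet P v u := by
        intro u _
        rw [pvGet_cons, if_neg (fun hc => hv hc.1)]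
      rw [List.map_congr_left hall, ih hnd.2 v, if_neg hv]
      ring

theorem pvSumGet_right (V : List String) :
    ∀ (P : List (String × String × Int)), (P.map (fun e => (e.1, e.2.1))).Nodup →
    ∀ v, (V.map (fun u => pvGet P u v)).sum
      = (P.map (fun e => if e.2.1 = v then e.2.2 * (V.count e.1 : Int) else 0)).sum := by
  intro P
  induction P with
  | nil => intro _ v; simp [pvGet_nil]
  | cons e P ih =>
    intro hnd v
    simp only [List.map_cons, List.nodup_cons] at hnd
    simp only [List.map_cons, List.sum_cons]
    by_cases hv : e.2.1 = v
    · have hzero : pvGet P e.1 v = 0 :=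
        pvGet_eq_zero_of_not_mem P e.1 v (by rw [← hv]; exact hnd.1)
      have hself : pvGet (e :: P) e.1 v = e.2.2 := by
        rw [pvGet_cons, if_pos ⟨rfl, hv⟩]
      have hoff : ∀ u, u ≠ e.1 → pvGet (e :: P) u v = pvGet P u v := by
        intro u hu
        rw [pvGet_cons, if_neg (fun hc => hu hc.1.symm)]
      rw [pvSum_point e.1 (fun u => pvGet (e :: P) u v) (fun u => pvGet P u v) hoff V,
        ih hnd.2 v, hself, hzero, if_pos hv]
      ring
    · have hall : ∀ u ∈ V, pvGet (e :: P) u v = pvGet P u v := by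
        intro u _
        rw [pvGet_cons, if_neg (fun hc => hv hc.2)]
      rw [List.map_congr_left hall, ih hnd.2 v, if_neg hv]
      ring

theorem pvCounter_getD (V : List String) (u : String) :
    (pvCounter V).getD u 0 = (V.count u : Int) := by
  have h : pvCounter V = PySem.Dict.counter V := by
    rw [PySem.Dict.counter_eq_foldl]; rfl
  rw [h, PySem.Dict.getD_counter]

theorem pvBase_step (cnt d : PySem.Dict String Int) (e : String × String × Int) (v : String) :
    ((d.modify e.1 0 (fun x => x + e.2.2 * cnt.getD e.2.1 0)).modify e.2.1 0
        (fun x => x - e.2.2 * cnt.getD e.1 0)).getD v 0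
      = d.getD v 0 + ((if e.1 = v then e.2.2 * cnt.getD e.2.1 0 else 0)
          + (if e.2.1 = v then -(e.2.2 * cnt.getD e.1 0) else 0)) := by
  simp only [PySem.Dict.getD_modify]
  rcases eq_or_ne v e.2.1 with h2 | h2 <;> rcases eq_or_ne v e.1 with h1 | h1
  · rw [← h2, ← h1]
    simp only [if_true]
    ring
  · rw [← h2]
    simp only [if_true, if_neg h1, if_neg (Ne.symm h1)]
    ring
  · rw [← h1]
    simp only [if_true, if_neg h2, if_neg (Ne.symm h2)]
    ring
  · simp only [if_neg h2, if_neg h1, if_neg (Ne.symm h1), if_neg (Ne.symm h2)]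
    ring

theorem pvBase_fold (cnt : PySem.Dict String Int) (v : String) :
    ∀ (P : List (String × String × Int)) (d : PySem.Dict String Int),
    (P.foldl (fun base e =>
      (base.modify e.1 0 (fun x => x + e.2.2 * cnt.getD e.2.1 0)).modify e.2.1 0
        (fun x => x - e.2.2 * cnt.getD e.1 0)) d).getD v 0
    = d.getD v 0
      + (P.map (fun e => (if e.1 = v then e.2.2 * cnt.getD e.2.1 0 else 0)
          + (if e.2.1 = v then -(e.2.2 * cnt.getD e.1 0) else 0))).sum := by
  intro P
  induction P with
  | nil => intro d; simp
  | cons e P ih =>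
    intro d
    simp only [List.foldl_cons, List.map_cons, List.sum_cons]
    rw [ih, pvBase_step cnt d e v]
    ring

theorem pvBase_getD (V : List String) (P : List (String × String × Int))
    (hnd : (P.map (fun e => (e.1, e.2.1))).Nodup) (v : String) :
    (pvBase P (pvCounter V)).getD v 0 = get_sum_prefs P V v := by
  unfold pvBase
  rw [pvBase_fold (pvCounter V) v P PySem.Dict.empty]
  have hmapeq : (P.map (fun e => (if e.1 = v then e.2.2 * (pvCounter V).getD e.2.1 0 else 0)
          + (if e.2.1 = v then -(e.2.2 * (pvCounter V).getD e.1 0) else 0)))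
      = P.map (fun e => (if e.1 = v then e.2.2 * (V.count e.2.1 : Int) else 0)
          + (if e.2.1 = v then -(e.2.2 * (V.count e.1 : Int)) else 0)) := by
    apply List.map_congr_left
    intro e _
    rw [pvCounter_getD, pvCounter_getD]
  rw [hmapeq, pvSum_map_add (fun e => if e.1 = v then e.2.2 * (V.count e.2.1 : Int) else 0)
    (fun e => if e.2.1 = v then -(e.2.2 * (V.count e.1 : Int)) else 0) P]
  have hneg : P.map (fun e => if e.2.1 = v then -(e.2.2 * (V.count e.1 : Int)) else 0)
      = P.map (fun e => -(if e.2.1 = v then e.2.2 * (V.count e.1 : Int) else 0)) := by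
    apply List.map_congr_left
    intro e _
    by_cases h : e.2.1 = v <;> simp [h]
  rw [hneg, pvSum_map_neg (fun e => if e.2.1 = v then e.2.2 * (V.count e.1 : Int) else 0) P,
    ← pvSumGet_left V P hnd v, ← pvSumGet_right V P hnd v, pvGsp_eq_sum]
  have hpv : V.map (pvF P v) = V.map (fun u => pvGet P v u - pvGet P u v) :=
    List.map_congr_left (fun u _ => rfl)
  rw [hpv, pvSum_map_sub (fun u => pvGet P v u) (fun u => pvGet P u v) V,
    PySem.Dict.getD_empty]
  ring

theorem pvLoop_eq (P : List (String × String × Int)) :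
    ∀ (fuel : Nat) (V out : List String),
    pvLoopA P fuel V (pvScanMax P V).1 out
      = pvLoopB P fuel V (V.map (fun v => get_sum_prefs P V v)) out := by
  intro fuel
  induction fuel with
  | zero => intro V out; simp [pvLoopA, pvLoopB]
  | succ fuel ih =>
    intro V out
    by_cases hlen : 1 < V.length
    · have hScan : pvScanMax P V
          = V.foldl (fun m v => if get_sum_prefs P V v > m.2 then (v, get_sum_prefs P V v) else m)
            ("", 0) := rfl
      have hScanB : pvScanB (V.zip (V.map (fun v => get_sum_prefs P V v)))
          = (PySem.List.enumerate (V.map (fun v => (v, get_sum_prefs P V v))) 0).foldl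
              (fun p iv => if iv.2.2 > p.2.1 then (iv.2.1, iv.2.2, iv.1) else p) ("", 0, -1) := by
        rw [pvScanB, pvZipSelf]
      rcases pvJoint (fun v => get_sum_prefs P V v) V 0 ("", 0) ("", 0, -1) rfl with
        ⟨h1, h2⟩ | ⟨j, hj, h1, h2, hpos, hfirst⟩
      · -- no vertex with positive sum: both return out ++ V
        have hmax : (pvScanMax P V).1 = "" := by rw [hScan, h1]
        have hB : (pvScanB (V.zip (V.map (fun v => get_sum_prefs P V v)))).1 = "" := by
          rw [hScanB, h2]
        rw [pvLoopA, pvLoopB, if_neg (by simp [hmax]), if_pos hlen]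
        simp [hB]
      · -- vertex V[j] has the strictly maximal (positive) sum, first attained at index j
        have hmax : (pvScanMax P V).1 = V[j] := by rw [hScan, h1]
        have hBall : pvScanB (V.zip (V.map (fun v => get_sum_prefs P V v)))
            = (V[j], get_sum_prefs P V V[j], ((0 : Int) + j)) := by
          rw [hScanB, h2]
        by_cases hne : V[j] = ""
        · -- the selected name is "": A's loop condition fails, B breaks; both return out ++ V
          rw [pvLoopA, pvLoopB, if_neg (by rw [hmax, hne]; simp), if_pos hlen]
          simp [hBall, hne]
        · have herase : V.erase V[j] = V.eraseIdx j := by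
            apply pvErase_eq_eraseIdx V j hj
            intro j' hj' heq
            exact absurd (congrArg (fun v => get_sum_prefs P V v) heq)
              (by have := hfirst j' hj'; simp only at this ⊢; omega)
          rw [pvLoopA, pvLoopB, if_pos ⟨hlen, hmax ▸ hne⟩, if_pos hlen]
          simp only [hBall, hmax]
          rw [if_neg hne]
          have hidx : ((0 : Int) + (j : Int)).toNat = j := by simp
          simp only [hidx]
          -- the updated sum list equals the recomputed sums over the shrunken list
          have hups : List.zipWith (fun v x => x - (pvGet P v V[j] - pvGet P V[j] v))
                (V.eraseIdx j) ((V.map (fun v => get_sum_prefs P V v)).eraseIdx j)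
              = (V.eraseIdx j).map (fun v => get_sum_prefs P (V.eraseIdx j) v) := by
            rw [← pvMap_eraseIdx]
            rw [pvZipWith_map (fun v => pvGet P v V[j] - pvGet P V[j] v) (V.eraseIdx j)
              (fun v => get_sum_prefs P V v)]
            apply List.map_congr_left
            intro v _
            rw [pvGsp_eraseIdx P V v j hj]
            simp [pvF]
          rw [herase, hups]
          exact ih (V.eraseIdx j) (out ++ [V[j]])
    · rw [pvLoopA, pvLoopB, if_neg (by intro h; exact hlen h.1), if_neg hlen]

-- ===== VERDICT (by name: the statement is the Claim_ definition above) =====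
theorem greedy_sort_spec : Claim_equal_greedy_sort := by
  intro X PREF _ hpre
  unfold Spec_greedy_sort greedy_sort greedy_sort_alt
  have hs : X.map (fun v => (pvBase PREF (pvCounter X)).getD v 0)
      = X.map (fun v => get_sum_prefs PREF X v) := by
    apply List.map_congr_left
    intro v _
    exact pvBase_getD X PREF hpre v
  rw [hs]
  exact pvLoop_eq PREF X.length X []
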